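-- pv_equiv track=rewrite | github.com/arun-8687/SupportAgent | codesentry/scanners/iac_scanner.py | _in_environment_context
-- ===== SOURCE A (Python) =====
-- from typing import Any, Dict, List, Optional
--
-- def _in_environment_context(lines: List[str], target_lineno: int) -> bool:
--     """Heuristic: check if target line is under an 'environment:' key."""
--     for i in range(target_lineno - 2, -1, -1):
--         stripped = lines[i].strip()
--         if stripped.startswith("environment"):
--             return True
--         if stripped and not stripped.startswith("-") and not stripped.startswith("#"):
--             if ":" in stripped and not stripped.startswith(" "):
--                 return False
--     return False
-- ===== SOURCE B (Python) =====
-- def _in_environment_context(lines, target_lineno):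
--     """Forward single pass with a state flag over the lines preceding the target."""
--     state = False
--     for line in lines[:max(0, target_lineno - 1)]:
--         stripped = line.strip()
--         if stripped.startswith("environment"):
--             state = True
--         elif stripped and not stripped.startswith("-") and not stripped.startswith("#") and ":" in stripped:
--             state = False
--     return state
-- ===== Notes on version B (the rewrite author's own statement) =====
-- stated objective: alternative
-- what changed: Replaces the backward early-exit index scan with a forward single pass over the preceding lines maintaining a boolean state (last decisive line wins), dropping the redundant startswith(' ') test on an already-stripped string.
-- outside the precondition, e.g. on _in_environment_context([], 3): A raises IndexError, B returns False
import Mathlib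
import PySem

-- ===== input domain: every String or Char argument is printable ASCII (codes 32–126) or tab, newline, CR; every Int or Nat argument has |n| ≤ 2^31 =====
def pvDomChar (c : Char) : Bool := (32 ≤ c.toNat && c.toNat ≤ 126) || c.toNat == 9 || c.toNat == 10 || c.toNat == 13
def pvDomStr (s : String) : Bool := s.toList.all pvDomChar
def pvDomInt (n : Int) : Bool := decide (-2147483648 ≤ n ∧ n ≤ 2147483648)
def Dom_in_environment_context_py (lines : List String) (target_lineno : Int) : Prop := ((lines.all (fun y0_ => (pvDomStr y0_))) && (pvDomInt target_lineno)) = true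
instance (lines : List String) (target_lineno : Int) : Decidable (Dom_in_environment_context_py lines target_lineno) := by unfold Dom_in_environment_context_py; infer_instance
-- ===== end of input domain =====

-- B replaces A's backward early-exit index scan by a forward fold with a state flag; same O(n) cost, different traversal.

-- ===== PORT A =====
-- backward loop over the indices range(target_lineno-2, -1, -1); returns at the first decisive line
def aLoop (lines : List String) : List Int → Bool
  | [] => false
  | i :: rest =>
    match PySem.List.pyGet? lines i with
    | none => false   -- IndexError in Python; excluded by Pre_
    | some line =>
      let stripped := PySem.Str.strip line
      if PySem.Str.startswith stripped "environment" then true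
      else if (stripped != "") && !(PySem.Str.startswith stripped "-") && !(PySem.Str.startswith stripped "#") then
        if PySem.Str.isIn ":" stripped && !(PySem.Str.startswith stripped " ") then false
        else aLoop lines rest
      else aLoop lines rest

def in_environment_context_py (lines : List String) (target_lineno : Int) : Bool :=
  aLoop lines (PySem.List.pyRange (target_lineno - 2) (-1) (-1))

-- ===== PORT B =====
-- one forward step of B's state machine
def bStep (state : Bool) (line : String) : Bool :=
  let stripped := PySem.Str.strip line
  if PySem.Str.startswith stripped "environment" then true
  else if (stripped != "") && !(PySem.Str.startswith stripped "-") && !(PySem.Str.startswith stripped "#") && PySem.Str.isIn ":" stripped then false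
  else state

def in_environment_context_py_alt (lines : List String) (target_lineno : Int) : Bool :=
  (PySem.List.slice lines none (some (max 0 (target_lineno - 1)))).foldl bStep false

-- ===== PRECONDITION & SPEC =====
-- Pre_ excludes exactly the inputs where A raises IndexError (the scan starts past the end of lines)
def Pre_in_environment_context_py (lines : List String) (target_lineno : Int) : Prop :=
  target_lineno ≤ lines.length + 1
instance (lines : List String) (target_lineno : Int) : Decidable (Pre_in_environment_context_py lines target_lineno) := by unfold Pre_in_environment_context_py; infer_instance
def pvWitness_in_environment_context_py : List String × Int := (["environment:", "  KEY: 1"], 2)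

def Spec_in_environment_context_py (lines : List String) (target_lineno : Int) (out : Bool) : Prop := out = in_environment_context_py_alt lines target_lineno
instance (lines : List String) (target_lineno : Int) (out : Bool) : Decidable (Spec_in_environment_context_py lines target_lineno out) := by unfold Spec_in_environment_context_py; infer_instance

-- ===== CLAIM (what is proved, stated in full; the proofs are below) =====
def Claim_equal_in_environment_context_py : Prop := ∀ (lines : List String) (target_lineno : Int), Dom_in_environment_context_py lines target_lineno → Pre_in_environment_context_py lines target_lineno → Spec_in_environment_context_py lines target_lineno (in_environment_context_py lines target_lineno)

-- ===== LEMMAS AND PROOFS =====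

-- a stripped string never starts with a space, so A's extra startswith(" ") test is vacuous
theorem strip_not_startswith_space (s : String) :
    PySem.Str.startswith (PySem.Str.strip s) " " = false := by
  simp only [PySem.Str.startswith, PySem.Str.strip, PySem.Chars.strip, PySem.Chars.lstrip,
    PySem.Chars.rstrip, PySem.Chars.startswith]
  by_contra hne
  have h : [' '].isPrefixOf (List.dropWhile PySem.Chars.isspace
      (List.dropWhile PySem.Chars.isspace s.toList).reverse).reverse = true := by
    simpa using hne
  rw [List.isPrefixOf_iff_prefix] at h
  set m := List.dropWhile PySem.Chars.isspace s.toList with hm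
  have hpre : (List.dropWhile PySem.Chars.isspace m.reverse).reverse <+: m := by
    rw [← List.reverse_suffix]
    simpa using List.dropWhile_suffix (l := m.reverse) PySem.Chars.isspace
  have h2 : [' '] <+: m := h.trans hpre
  obtain ⟨t, ht⟩ := h2
  have hne' : m ≠ [] := by rw [← ht]; simp
  have hd : m.head hne' = ' ' := by
    have : m = ' ' :: t := ht.symm
    simp [this]
  have hf := List.head_dropWhile_not PySem.Chars.isspace (l := s.toList) hne'
  rw [hd] at hf
  exact absurd hf (by decide)

-- A's backward scan over indices k-1 … 0 equals B's forward fold over the first k lines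
theorem aLoop_eq_foldl (lines : List String) (k : Nat) (hk : k ≤ lines.length) :
    aLoop lines (PySem.List.pyRange ((k : Int) - 1) (-1) (-1)) = (lines.take k).foldl bStep false := by
  induction k with
  | zero =>
    rw [PySem.List.pyRange_neg_one_eq_nil (by omega)]
    simp [aLoop]
  | succ k ih =>
    have hk' : k < lines.length := by omega
    have h1 : ((k + 1 : Nat) : Int) - 1 = (k : Int) := by push_cast; ring
    rw [h1, PySem.List.pyRange_neg_one_cons (by omega)]
    have hget : PySem.List.pyGet? lines (k : Int) = some lines[k] := by
      rw [PySem.List.pyGet?_natCast lines k, List.getElem?_eq_getElem hk']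
    rw [List.take_add_one, List.getElem?_eq_getElem hk', Option.toList_some, List.foldl_append]
    rw [← ih (by omega)]
    simp only [aLoop, hget, bStep, List.foldl_cons, List.foldl_nil]
    rw [strip_not_startswith_space]
    cases he : PySem.Str.startswith (PySem.Str.strip lines[k]) "environment" <;>
      cases hne : (PySem.Str.strip lines[k] != "") <;>
        cases hd : PySem.Str.startswith (PySem.Str.strip lines[k]) "-" <;>
          cases hh : PySem.Str.startswith (PySem.Str.strip lines[k]) "#" <;>
            cases hc : PySem.Str.isIn ":" (PySem.Str.strip lines[k]) <;> simp

-- ===== VERDICT (by name: the statement is the Claim_ definition above) =====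
theorem in_environment_context_py_spec : Claim_equal_in_environment_context_py := by
  intro lines t _hdom hpre
  unfold Spec_in_environment_context_py in_environment_context_py in_environment_context_py_alt
  have hmax : max 0 (t - 1) = (((t - 1).toNat : Nat) : Int) := by omega
  rw [hmax, PySem.List.slice_to_natCast]
  by_cases h1 : 1 ≤ t
  · have ht : t - 2 = (((t - 1).toNat : Nat) : Int) - 1 := by omega
    rw [ht]
    exact aLoop_eq_foldl lines _ (by unfold Pre_in_environment_context_py at hpre; omega)
  · have hk : (t - 1).toNat = 0 := by omega
    rw [hk, PySem.List.pyRange_neg_one_eq_nil (by omega)]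
    simp [aLoop]
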